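-- pv_equiv track=rewrite | github.com/jsmsj/LeetCodeSolutions | 15.3-sum.py | choose_3
-- ===== SOURCE A (Python) =====
-- def choose_3(ls):
--     combos = []
--     for i in range(len(ls)):
--         for j in range(len(ls)):
--             for k in range(len(ls)):
--                 if i!=j and i!=k and j!=k:
--                     x = sorted([i,j,k])
--                     if x not in combos:
--                         combos.append(x)
--     final = []
--     for m in combos:
--         i,j,k = m
--         final.append([ls[i],ls[j],ls[k]])
--     return final
-- ===== SOURCE B (Python) =====
-- def choose_3(ls):
--     # Structural recursion: triples that keep the head, then triples of the tail.
--     if not ls: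
--         return []
--     return [[ls[0]] + p for p in _pairs(ls[1:])] + choose_3(ls[1:])
--
-- def _pairs(xs):
--     if not xs:
--         return []
--     return [[xs[0], y] for y in xs[1:]] + _pairs(xs[1:])
-- ===== Notes on version B (the rewrite author's own statement) =====
-- stated objective: faster
-- what changed: A enumerates all n^3 ordered index triples, sorts each, dedups by scanning the accumulator, then maps indices to values in a second pass; B recurses on the list structure, emitting head-anchored triples via a pair helper, so each combination is produced exactly once with no sorting, no membership scans and no index phase.
import Mathlib
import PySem

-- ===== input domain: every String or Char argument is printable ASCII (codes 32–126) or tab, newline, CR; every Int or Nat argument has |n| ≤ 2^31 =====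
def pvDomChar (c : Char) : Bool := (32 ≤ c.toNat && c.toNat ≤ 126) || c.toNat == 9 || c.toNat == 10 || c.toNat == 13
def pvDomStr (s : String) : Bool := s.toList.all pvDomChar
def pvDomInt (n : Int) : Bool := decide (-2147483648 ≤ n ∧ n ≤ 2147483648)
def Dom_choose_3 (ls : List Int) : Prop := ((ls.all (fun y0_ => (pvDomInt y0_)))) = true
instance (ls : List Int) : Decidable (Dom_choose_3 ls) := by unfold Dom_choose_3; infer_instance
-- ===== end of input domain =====

-- B replaces A's cube-of-ordered-triples + sort + dedup-by-scan with direct structural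
-- recursion emitting each combination once; measurably faster (asymptotically smaller work).

-- ===== PORT A =====
def choose_3 (ls : List Int) : List (List Int) :=
  let combos :=
    (PySem.List.pyRange 0 ls.length 1).foldl (fun cs i =>
      (PySem.List.pyRange 0 ls.length 1).foldl (fun cs j =>
        (PySem.List.pyRange 0 ls.length 1).foldl (fun cs k =>
          if i ≠ j ∧ i ≠ k ∧ j ≠ k then
            let x := PySem.List.sorted [i, j, k] (fun v => v) false
            if x ∈ cs then cs else cs ++ [x]
          else cs) cs) cs) ([] : List (List Int))
  -- i, j, k = m : m always has exactly 3 in-range elements here, so pyGetD is exact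
  combos.foldl (fun fin m =>
    fin ++ [[PySem.List.pyGetD ls (PySem.List.pyGetD m 0 0) 0,
             PySem.List.pyGetD ls (PySem.List.pyGetD m 1 0) 0,
             PySem.List.pyGetD ls (PySem.List.pyGetD m 2 0) 0]]) []

-- ===== PORT B =====
def pairsB : List Int → List (List Int)
  | [] => []
  | x :: xs => xs.map (fun y => [x, y]) ++ pairsB xs

def choose_3_alt : List Int → List (List Int)
  | [] => []
  | x :: xs => (pairsB xs).map (fun p => x :: p) ++ choose_3_alt xs

-- ===== PRECONDITION & SPEC =====
def Spec_choose_3 (ls : List Int) (out : List (List Int)) : Prop := out = choose_3_alt ls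
instance (ls : List Int) (out : List (List Int)) : Decidable (Spec_choose_3 ls out) := by unfold Spec_choose_3; infer_instance

-- ===== CLAIM (what is proved, stated in full; the proofs are below) =====
def Claim_equal_choose_3 : Prop := ∀ (ls : List Int), Dom_choose_3 ls → Spec_choose_3 ls (choose_3 ls)


-- ===== LEMMAS AND PROOFS =====

-- value lookup as performed by port A's final loop
def ggI (ls : List Int) (i : Int) : Int := PySem.List.pyGetD ls i 0

def valF (ls : List Int) (m : List Int) : List Int :=
  [ggI ls (PySem.List.pyGetD m 0 0), ggI ls (PySem.List.pyGetD m 1 0),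
   ggI ls (PySem.List.pyGetD m 2 0)]

-- the three nested loop bodies of port A, named for the proofs
def kstep (i j : Int) (cs : List (List Int)) (k : Int) : List (List Int) :=
  if i ≠ j ∧ i ≠ k ∧ j ≠ k then
    let x := PySem.List.sorted [i, j, k] (fun v => v) false
    if x ∈ cs then cs else cs ++ [x]
  else cs

def jstep (N i : Int) (cs : List (List Int)) (j : Int) : List (List Int) :=
  (PySem.List.pyRange 0 N 1).foldl (kstep i j) cs

def istep (N : Int) (cs : List (List Int)) (i : Int) : List (List Int) :=
  (PySem.List.pyRange 0 N 1).foldl (jstep N i) cs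

-- canonical enumeration of index triples, lexicographic
def rowT (a j N : Int) : List (List Int) :=
  (PySem.List.pyRange (j+1) N 1).map (fun c => [a, j, c])

def blockUp (a t N : Int) : List (List Int) :=
  (PySem.List.pyRange (a+1) t 1).flatMap (fun j => rowT a j N)

def tripsUp (t N : Int) : List (List Int) :=
  (PySem.List.pyRange 0 t 1).flatMap (fun a => blockUp a N N)

theorem choose_3_unfold (ls : List Int) :
    choose_3 ls =
      ((PySem.List.pyRange 0 ls.length 1).foldl (istep ls.length) []).foldl
        (fun fin m => fin ++ [valF ls m]) [] := by
  rfl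

theorem foldl_fixed {α β : Type} (f : β → α → β) (L : List α) (cs : β)
    (h : ∀ x ∈ L, f cs x = cs) : L.foldl f cs = cs := by
  induction L with
  | nil => rfl
  | cons x xs ih =>
    simp only [List.foldl_cons]
    rw [h x (by simp)]
    exact ih (fun y hy => h y (by simp [hy]))

theorem sorted3 {a b c : Int} (hab : a < b) (hbc : b < c) (l : List Int)
    (hp : List.Perm [a, b, c] l) :
    PySem.List.sorted l (fun v => v) false = [a, b, c] := by
  apply PySem.List.sorted_eq_of_perm_of_pairwise_lt l [a, b, c] (fun v => v) hp
  exact List.Pairwise.cons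
    (fun y hy => by
      rcases List.mem_cons.mp hy with rfl | hy2
      · exact hab
      · rcases List.mem_cons.mp hy2 with rfl | h3
        · omega
        · simp at h3)
    (List.Pairwise.cons
      (fun y hy => by
        rcases List.mem_cons.mp hy with rfl | h3
        · exact hbc
        · simp at h3)
      (List.pairwise_singleton _ _))

theorem perm3_swap01 (x y z : Int) : List.Perm [y, x, z] [x, y, z] := List.Perm.swap x y [z]
theorem perm3_swap12 (x y z : Int) : List.Perm [x, z, y] [x, y, z] := List.Perm.cons x (List.Perm.swap y z [])
theorem perm3_rotL (x y z : Int) : List.Perm [y, z, x] [x, y, z] :=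
  (List.Perm.cons y (List.Perm.swap x z [])).trans (perm3_swap01 x y z)
theorem perm3_rotR (x y z : Int) : List.Perm [z, x, y] [x, y, z] :=
  (List.Perm.swap x z [y]).trans (perm3_swap12 x y z)
theorem perm3_rev (x y z : Int) : List.Perm [z, y, x] [x, y, z] :=
  (List.Perm.swap y z [x]).trans (perm3_rotL x y z)

theorem mem_rowT {m : List Int} {a j N : Int} :
    m ∈ rowT a j N ↔ ∃ c : Int, j < c ∧ c < N ∧ m = [a, j, c] := by
  simp only [rowT, List.mem_map, PySem.List.mem_pyRange_one]
  constructor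
  · rintro ⟨c, ⟨h1, h2⟩, e⟩; exact ⟨c, by omega, h2, e.symm⟩
  · rintro ⟨c, h1, h2, e⟩; exact ⟨c, ⟨by omega, h2⟩, e.symm⟩

theorem mem_blockUp {m : List Int} {a t N : Int} :
    m ∈ blockUp a t N ↔ ∃ b c : Int, a < b ∧ b < t ∧ b < c ∧ c < N ∧ m = [a, b, c] := by
  simp only [blockUp, List.mem_flatMap, PySem.List.mem_pyRange_one, mem_rowT]
  constructor
  · rintro ⟨j, ⟨h1, h2⟩, c, h3, h4, e⟩; exact ⟨j, c, by omega, h2, h3, h4, e⟩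
  · rintro ⟨b, c, h1, h2, h3, h4, e⟩; exact ⟨b, ⟨by omega, h2⟩, c, h3, h4, e⟩

theorem mem_tripsUp {m : List Int} {t N : Int} :
    m ∈ tripsUp t N ↔
      ∃ x b c : Int, 0 ≤ x ∧ x < t ∧ x < b ∧ b < c ∧ c < N ∧ m = [x, b, c] := by
  simp only [tripsUp, List.mem_flatMap, PySem.List.mem_pyRange_one, mem_blockUp]
  constructor
  · rintro ⟨x, ⟨h0, h1⟩, b, c, h2, h3, h4, h5, e⟩; exact ⟨x, b, c, h0, h1, h2, h4, h5, e⟩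
  · rintro ⟨x, b, c, h0, h1, h2, h4, h5, e⟩; exact ⟨x, ⟨h0, h1⟩, b, c, h2, by omega, h4, h5, e⟩

theorem blockUp_succ {a t N : Int} (h : a < t) :
    blockUp a (t+1) N = blockUp a t N ++ rowT a t N := by
  unfold blockUp
  rw [PySem.List.pyRange_one_succ_right (by omega), List.flatMap_append]
  simp

theorem tripsUp_succ {t N : Int} (h : 0 ≤ t) :
    tripsUp (t+1) N = tripsUp t N ++ blockUp t N N := by
  unfold tripsUp
  rw [PySem.List.pyRange_one_succ_right (by omega), List.flatMap_append]
  simp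

-- appending a fresh row: the k-suffix (j, N) of the innermost loop
theorem krow (a j N : Int) (haj : a < j) :
    ∀ (d : Nat) (t : Int) (cs : List (List Int)), j < t → (N - t).toNat ≤ d →
      (∀ c : Int, t ≤ c → c < N → [a, j, c] ∉ cs) →
      (PySem.List.pyRange t N 1).foldl (kstep a j) cs =
        cs ++ (PySem.List.pyRange t N 1).map (fun c => [a, j, c]) := by
  intro d
  induction d with
  | zero =>
    intro t cs hjt hd hfresh
    rw [PySem.List.pyRange_one_eq_nil (by omega)]
    simp
  | succ d ih =>
    intro t cs hjt hd hfresh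
    by_cases htN : t < N
    · rw [PySem.List.pyRange_one_cons htN]
      simp only [List.foldl_cons, List.map_cons]
      have hstep : kstep a j cs t = cs ++ [[a, j, t]] := by
        unfold kstep
        rw [if_pos ⟨by omega, by omega, by omega⟩]
        simp only
        rw [sorted3 haj hjt [a, j, t] (List.Perm.refl _)]
        rw [if_neg (hfresh t le_rfl htN)]
      rw [hstep, ih (t+1) (cs ++ [[a, j, t]]) (by omega) (by omega) ?_]
      · simp
      · intro c hc1 hc2
        simp only [List.mem_append, List.mem_singleton]
        rintro (h | h)
        · exact hfresh c (by omega) hc2 h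
        · simp only [List.cons.injEq, and_true] at h; omega
    · rw [PySem.List.pyRange_one_eq_nil (by omega)]
      simp

-- the full innermost loop for a fresh row j (a < j < N)
theorem kfull (a j N : Int) (ha0 : 0 ≤ a) (haj : a < j) (hjN : j < N)
    (cs : List (List Int))
    (hold : ∀ k : Int, 0 ≤ k → k < j → k ≠ a →
      PySem.List.sorted [a, j, k] (fun v => v) false ∈ cs)
    (hnew : ∀ c : Int, j < c → c < N → [a, j, c] ∉ cs) :
    jstep N a cs j = cs ++ rowT a j N := by
  unfold jstep rowT
  rw [PySem.List.pyRange_one_append 0 (j+1) N (by omega) (by omega), List.foldl_append]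
  rw [foldl_fixed _ _ cs ?_]
  · exact krow a j N haj (N - (j+1)).toNat (j+1) cs (by omega) (by omega)
      (fun c hc1 hc2 => hnew c (by omega) hc2)
  · intro k hk
    rw [PySem.List.mem_pyRange_one] at hk
    unfold kstep
    by_cases hkj : k = j
    · rw [if_neg]; simp [hkj]
    · by_cases hka : k = a
      · rw [if_neg]; simp [hka]
      · rw [if_pos ⟨by omega, by omega, by omega⟩]
        simp only
        rw [if_pos (hold k (by omega) (by omega) hka)]

-- the innermost loop is a no-op when j ≤ i = a and cs already holds all smaller-min triples
theorem jnoop (N a j : Int) (h0j : 0 ≤ j) (hja : j ≤ a) (haN : a < N)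
    (cs : List (List Int))
    (hmem : ∀ x b c : Int, 0 ≤ x → x < b → b < c → c < N → x < a → [x, b, c] ∈ cs) :
    jstep N a cs j = cs := by
  unfold jstep
  apply foldl_fixed
  intro k hk
  rw [PySem.List.mem_pyRange_one] at hk
  unfold kstep
  by_cases hja' : j = a
  · rw [if_neg]; simp [hja']
  · have hja2 : j < a := by omega
    by_cases hkj : k = j
    · rw [if_neg]; simp [hkj]
    · by_cases hka : k = a
      · rw [if_neg]; simp [hka]
      · rw [if_pos ⟨by omega, by omega, by omega⟩]
        simp only
        rcases lt_trichotomy k j with h1 | h1 | h1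
        · -- k < j < a : sorted [a,j,k] = [k,j,a]
          rw [sorted3 h1 hja2 [a, j, k] (perm3_rev a j k)]
          rw [if_pos (hmem k j a (by omega) h1 hja2 haN (by omega))]
        · omega
        · rcases lt_trichotomy k a with h2 | h2 | h2
          · -- j < k < a : sorted [a,j,k] = [j,k,a]
            rw [sorted3 h1 h2 [a, j, k] (perm3_rotL a j k)]
            rw [if_pos (hmem j k a (by omega) h1 h2 haN hja2)]
          · omega
          · -- j < a < k : sorted [a,j,k] = [j,a,k]
            rw [sorted3 hja2 h2 [a, j, k] (perm3_swap01 a j k)]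
            rw [if_pos (hmem j a k (by omega) hja2 h2 (by omega) hja2)]

-- the j-suffix (a, N) of the middle loop accumulates the whole block of i = a
theorem jrow (N a : Int) (h0a : 0 ≤ a) (haN : a < N) :
    ∀ (d : Nat) (t : Int), a < t → t ≤ N → (N - t).toNat ≤ d →
      (PySem.List.pyRange t N 1).foldl (jstep N a) (tripsUp a N ++ blockUp a t N) =
        tripsUp a N ++ blockUp a N N := by
  intro d
  induction d with
  | zero =>
    intro t hat htN hd
    have ht : t = N := by omega
    subst ht
    rw [PySem.List.pyRange_one_eq_nil le_rfl]
    rfl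
  | succ d ih =>
    intro t hat htN hd
    by_cases htN' : t < N
    · rw [PySem.List.pyRange_one_cons htN']
      simp only [List.foldl_cons]
      have hstep : jstep N a (tripsUp a N ++ blockUp a t N) t =
          tripsUp a N ++ blockUp a (t+1) N := by
        rw [kfull a t N h0a hat htN' _ ?_ ?_, blockUp_succ hat, List.append_assoc]
        · -- hold: every already-seen triple formed with i = a, j = t, k < t is present
          intro k hk0 hkt hka
          rcases lt_trichotomy k a with h2 | h2 | h2
          · rw [sorted3 h2 hat [a, t, k] (perm3_rotR a t k)]
            apply List.mem_append_left
            rw [mem_tripsUp]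
            exact ⟨k, a, t, hk0, h2, h2, hat, htN', rfl⟩
          · exact absurd h2 hka
          · rw [sorted3 h2 hkt [a, t, k] (perm3_swap12 a t k)]
            apply List.mem_append_right
            rw [mem_blockUp]
            exact ⟨k, t, h2, hkt, hkt, htN', rfl⟩
        · -- hnew: the row j = t is fresh
          intro c hc1 hc2
          simp only [List.mem_append]
          rintro (h | h)
          · rw [mem_tripsUp] at h
            obtain ⟨x, b, c', _, hxa, _, _, _, he⟩ := h
            simp only [List.cons.injEq, and_true] at he
            omega
          · rw [mem_blockUp] at h
            obtain ⟨b, c', _, hbt, _, _, he⟩ := h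
            simp only [List.cons.injEq, and_true] at he
            omega
      rw [hstep]
      exact ih (t+1) (by omega) (by omega) (by omega)
    · have ht : t = N := by omega
      subst ht
      rw [PySem.List.pyRange_one_eq_nil le_rfl]
      rfl

-- one full middle loop turns tripsUp a into tripsUp (a+1)
theorem jloop (N a : Int) (h0a : 0 ≤ a) (haN : a < N) :
    istep N (tripsUp a N) a = tripsUp (a+1) N := by
  unfold istep
  rw [PySem.List.pyRange_one_append 0 (a+1) N (by omega) (by omega), List.foldl_append]
  have hfix : List.foldl (jstep N a) (tripsUp a N) (PySem.List.pyRange 0 (a+1) 1) =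
      tripsUp a N := by
    apply foldl_fixed
    intro j hj
    rw [PySem.List.mem_pyRange_one] at hj
    exact jnoop N a j (by omega) (by omega) haN _
      (fun x b c h0 h1 h2 h3 h4 => by rw [mem_tripsUp]; exact ⟨x, b, c, h0, h4, h1, h2, h3, rfl⟩)
  rw [hfix]
  have hb : blockUp a (a+1) N = [] := by
    simp [blockUp, PySem.List.pyRange_one_eq_nil (le_refl (a+1))]
  have hj := jrow N a h0a haN (N-(a+1)).toNat (a+1) (by omega) (by omega) (by omega)
  rw [hb, List.append_nil] at hj
  rw [tripsUp_succ h0a]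
  exact hj

-- the outer loop
theorem iloop (N : Int) :
    ∀ (d : Nat) (t : Int), 0 ≤ t → t ≤ N → (N - t).toNat ≤ d →
      (PySem.List.pyRange t N 1).foldl (istep N) (tripsUp t N) = tripsUp N N := by
  intro d
  induction d with
  | zero =>
    intro t h0t htN hd
    have ht : t = N := by omega
    subst ht
    rw [PySem.List.pyRange_one_eq_nil le_rfl]
    rfl
  | succ d ih =>
    intro t h0t htN hd
    by_cases htN' : t < N
    · rw [PySem.List.pyRange_one_cons htN']
      simp only [List.foldl_cons]
      rw [jloop N t h0t htN']
      exact ih (t+1) (by omega) (by omega) (by omega)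
    · have ht : t = N := by omega
      subst ht
      rw [PySem.List.pyRange_one_eq_nil le_rfl]
      rfl

theorem combos_eq (N : Int) (h : 0 ≤ N) :
    (PySem.List.pyRange 0 N 1).foldl (istep N) [] = tripsUp N N := by
  have h0 : tripsUp 0 N = [] := by
    simp [tripsUp, PySem.List.pyRange_one_eq_nil (by omega : (0:Int) ≤ 0)]
  rw [← h0]
  exact iloop N (N.toNat) 0 le_rfl h (by omega)

-- ===== B side =====

theorem pyGetD3_1 (x y z d : Int) : PySem.List.pyGetD [x, y, z] 1 d = y := rfl
theorem pyGetD3_2 (x y z d : Int) : PySem.List.pyGetD [x, y, z] 2 d = z := rfl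

theorem pairsB_main (LS : List Int) :
    ∀ (d : Nat) (b : Nat), LS.length ≤ b + d →
      pairsB (LS.drop b) =
        (PySem.List.pyRange (b : Int) LS.length 1).flatMap
          (fun x => (PySem.List.pyRange (x+1) LS.length 1).map
            (fun c => [ggI LS x, ggI LS c])) := by
  intro d
  induction d with
  | zero =>
    intro b hb
    have hb0 : LS.length ≤ b := by omega
    rw [List.drop_eq_nil_of_le hb0,
      PySem.List.pyRange_one_eq_nil (by exact_mod_cast hb0)]
    rfl
  | succ d ih =>
    intro b hb
    by_cases hbl : LS.length ≤ b
    · rw [List.drop_eq_nil_of_le hbl,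
        PySem.List.pyRange_one_eq_nil (by exact_mod_cast hbl)]
      rfl
    · have hb' : b < LS.length := by omega
      rw [List.drop_eq_getElem_cons hb']
      rw [pairsB]
      rw [PySem.List.pyRange_one_cons (by exact_mod_cast hb'), List.flatMap_cons]
      have hcast : (b : Int) + 1 = ((b + 1 : Nat) : Int) := by push_cast; ring
      have hgb : ggI LS (b : Int) = LS[b] := by
        simp [ggI, PySem.List.pyGetD_natCast, List.getD_eq_getElem?_getD,
          List.getElem?_eq_getElem hb']
      congr 1
      · have hmap : (PySem.List.pyRange ((b+1 : Nat) : Int) LS.length 1).map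
            (fun c => PySem.List.pyGetD LS c 0) = LS.drop (b+1) := by
          rw [PySem.List.map_pyGetD_pyRange' LS 0 (by omega)]
          simp
        rw [hcast, show (fun c => [ggI LS (b:Int), ggI LS c]) =
            ((fun y => [LS[b], y]) ∘ (fun c => PySem.List.pyGetD LS c 0)) from
          funext fun c => by
            simp [Function.comp, ggI, List.getD_eq_getElem?_getD,
              List.getElem?_eq_getElem hb'],
          ← List.map_map, hmap]
      · rw [hcast]
        exact ih (b+1) (by omega)

theorem B_main (LS : List Int) :
    ∀ (d : Nat) (a : Nat), LS.length ≤ a + d →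
      choose_3_alt (LS.drop a) =
        ((PySem.List.pyRange (a : Int) LS.length 1).flatMap
          (fun x => blockUp x LS.length LS.length)).map (valF LS) := by
  intro d
  induction d with
  | zero =>
    intro a ha
    have ha0 : LS.length ≤ a := by omega
    rw [List.drop_eq_nil_of_le ha0,
      PySem.List.pyRange_one_eq_nil (by exact_mod_cast ha0)]
    rfl
  | succ d ih =>
    intro a ha
    by_cases hal : LS.length ≤ a
    · rw [List.drop_eq_nil_of_le hal,
        PySem.List.pyRange_one_eq_nil (by exact_mod_cast hal)]
      rfl
    · have ha' : a < LS.length := by omega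
      rw [List.drop_eq_getElem_cons ha']
      rw [choose_3_alt]
      rw [PySem.List.pyRange_one_cons (by exact_mod_cast ha'), List.flatMap_cons,
        List.map_append]
      have hcast : (a : Int) + 1 = ((a + 1 : Nat) : Int) := by push_cast; ring
      have hgb : ggI LS (a : Int) = LS[a] := by
        simp [ggI, PySem.List.pyGetD_natCast, List.getD_eq_getElem?_getD,
          List.getElem?_eq_getElem ha']
      congr 1
      · -- head block: values of the fresh triples
        rw [pairsB_main LS d (a+1) (by omega)]
        unfold blockUp rowT
        rw [List.map_flatMap, List.map_flatMap, hcast]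
        simp only [List.map_map]
        congr 1
        funext j
        congr 1
        funext c
        simp [Function.comp, valF, pyGetD3_1, pyGetD3_2, hgb]
      · rw [hcast]
        exact ih (a+1) (by omega)

theorem choose_3_main (ls : List Int) : choose_3 ls = choose_3_alt ls := by
  rw [choose_3_unfold, combos_eq (ls.length : Int) (by omega),
    PySem.List.foldl_append_singleton_eq_map]
  have := B_main ls ls.length 0 (by omega)
  simp only [List.drop_zero, Nat.cast_zero] at this
  rw [this]
  rfl

-- ===== VERDICT (by name: the statement is the Claim_ definition above) =====
theorem choose_3_spec : Claim_equal_choose_3 := by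
  intro ls _
  exact choose_3_main ls
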